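-- pv_equiv track=rewrite | github.com/danielamezcua/LintCode | most_freq_letters.py | mostFrequentlyAppearingLetters
-- ===== SOURCE A (Python) =====
-- def mostFrequentlyAppearingLetters(str):
--     # Write your code here.
--     #init dictionary and max frequency
--     frequency = {}
--     max_frequency = 0
--     #Iterate over string
--     for c in str:
--         #check if in dictionary
--         if c in frequency:
--         #if yes, add 1 to the value and compare it to max value
--             frequency[c] += 1
--         #if not, add entry and set value to 1
--         else:
--             frequency[c] = 1
--         if frequency[c] > max_frequency:
--             max_frequency = frequency[c]
--     return max_frequency
-- ===== SOURCE B (Python) =====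
-- def mostFrequentlyAppearingLetters(str):
--     # Recurse over the distinct characters: strip all copies of the first
--     # character, measure its count as the length drop, recurse on the rest.
--     if not str:
--         return 0
--     c = str[0]
--     rest = "".join(ch for ch in str if ch != c)
--     return max(len(str) - len(rest), mostFrequentlyAppearingLetters(rest))
-- ===== Notes on version B (the rewrite author's own statement) =====
-- stated objective: alternative
-- what changed: B replaces A's one-pass dict counting with running max by a recursion over distinct characters: it takes the first character, obtains its count as the length drop after filtering it out, and recurses on the filtered remainder; no frequency table exists at any point.
import Mathlib
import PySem

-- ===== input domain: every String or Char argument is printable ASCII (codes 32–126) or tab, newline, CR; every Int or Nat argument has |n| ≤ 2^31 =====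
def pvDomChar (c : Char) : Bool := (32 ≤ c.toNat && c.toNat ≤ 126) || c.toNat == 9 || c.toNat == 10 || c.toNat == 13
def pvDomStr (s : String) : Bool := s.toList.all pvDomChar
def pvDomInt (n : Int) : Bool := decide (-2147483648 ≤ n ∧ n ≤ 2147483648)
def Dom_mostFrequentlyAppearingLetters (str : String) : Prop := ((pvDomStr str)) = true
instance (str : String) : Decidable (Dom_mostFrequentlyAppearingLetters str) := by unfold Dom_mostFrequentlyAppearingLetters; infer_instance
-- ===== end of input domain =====

-- B replaces A's one-pass dict counting with a recursion over distinct characters: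
-- take the first character, get its count as the length drop after filtering it
-- out, and recurse on the filtered remainder; no frequency table is ever built.

-- ===== PORT A =====
def mostFrequentlyAppearingLetters (str : String) : Int :=
  (str.toList.foldl
    (fun (st : PySem.Dict Char Int × Int) c =>
      -- if c in frequency: frequency[c] += 1 else: frequency[c] = 1
      let frequency := if st.1.contains c then st.1.modify c 0 (· + 1) else st.1.insert c 1
      -- frequency[c]: c is a key of `frequency` here, so getD 0 is Python's frequency[c]
      let fc := frequency.getD c 0
      (frequency, if fc > st.2 then fc else st.2))
    (PySem.Dict.empty, 0)).2

-- ===== PORT B =====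
-- rest = "".join(ch for ch in str if ch != c) is the join of the filtered
-- singleton strings; PySem.Chars.join [] over the singletons is exact here.
def pvAltGo : List Char → Int
  | [] => 0
  | c :: t =>
    let rest := PySem.Chars.join [] (((c :: t).filter (fun ch => ch != c)).map (fun ch => [ch]))
    max (((c :: t).length : Int) - (rest.length : Int)) (pvAltGo rest)
  termination_by l => l.length
  decreasing_by
    simp only [PySem.Chars.join_nil_singletons, List.filter_cons, bne_self_eq_false,
      Bool.false_eq_true]
    have := List.length_filter_le (fun ch => ch != c) t
    simpa using Nat.lt_succ_of_le this

def mostFrequentlyAppearingLetters_alt (str : String) : Int :=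
  pvAltGo str.toList

-- ===== PRECONDITION & SPEC =====
def Spec_mostFrequentlyAppearingLetters (str : String) (out : Int) : Prop := out = mostFrequentlyAppearingLetters_alt str
instance (str : String) (out : Int) : Decidable (Spec_mostFrequentlyAppearingLetters str out) := by unfold Spec_mostFrequentlyAppearingLetters; infer_instance

-- ===== CLAIM (what is proved, stated in full; the proofs are below) =====
def Claim_equal_mostFrequentlyAppearingLetters : Prop := ∀ (str : String), Dom_mostFrequentlyAppearingLetters str → Spec_mostFrequentlyAppearingLetters str (mostFrequentlyAppearingLetters str)

-- ===== LEMMAS AND PROOFS =====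

-- the max frequency of a character list: max over the distinct chars of their counts
def pvVals (l : List Char) : List Int :=
  (PySem.List.dedup l).map (fun k => (l.count k : Int))

def pvV (l : List Char) : Int := (pvVals l).foldl max 0

theorem foldl_max_out (Z : List Int) : ∀ b y, Z.foldl max (max b y) = max (Z.foldl max b) y := by
  induction Z with
  | nil => intro b y; rfl
  | cons z Z ih =>
    intro b y
    simp only [List.foldl_cons]
    rw [max_right_comm, ih]

theorem le_foldl_max (xs : List Int) : ∀ a, a ≤ xs.foldl max a := by
  induction xs with
  | nil => intro a; simp
  | cons x xs ih => intro a; exact le_trans (le_max_left a x) (ih _)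

theorem mem_le_foldl_max (xs : List Int) (x : Int) (hx : x ∈ xs) : ∀ a, x ≤ xs.foldl max a := by
  induction xs with
  | nil => cases hx
  | cons y ys ih =>
    intro a
    rcases List.mem_cons.1 hx with rfl | h
    · exact le_trans (le_max_right a x) (le_foldl_max ys _)
    · simpa only [List.foldl_cons] using ih h (max a y)
  
theorem foldl_max_le (xs : List Int) (b : Int) (h : ∀ x ∈ xs, x ≤ b) : ∀ a, a ≤ b → xs.foldl max a ≤ b := by
  induction xs with
  | nil => intro a ha; simpa using ha
  | cons x xs ih =>
    intro a ha
    exact ih (fun y hy => h y (List.mem_cons_of_mem _ hy)) _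
      (max_le ha (h x List.mem_cons_self))

theorem zero_le_pvV (l : List Char) : 0 ≤ pvV l := le_foldl_max _ 0

theorem mem_count_le_pvV (l : List Char) (k : Char) (hk : k ∈ l) : (l.count k : Int) ≤ pvV l := by
  apply mem_le_foldl_max
  exact List.mem_map.2 ⟨k, (PySem.List.mem_dedup _ _).2 hk, rfl⟩

theorem pvV_le (l : List Char) (b : Int) (hb : 0 ≤ b)
    (h : ∀ k ∈ l, (l.count k : Int) ≤ b) : pvV l ≤ b := by
  apply foldl_max_le _ _ _ _ hb
  intro x hx
  obtain ⟨k, hk, rfl⟩ := List.mem_map.1 hx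
  exact h k ((PySem.List.mem_dedup _ _).1 hk)

theorem count_filter_ne (l : List Char) (c k : Char) (hk : k ≠ c) :
    (l.filter (fun ch => ch != c)).count k = l.count k := by
  rw [List.count_filter]
  simp [hk]

theorem pvV_cons (c : Char) (t : List Char) :
    pvV (c :: t) = max (((c :: t).count c : Int)) (pvV ((c :: t).filter (fun ch => ch != c))) := by
  set l := c :: t with hl
  set r := l.filter (fun ch => ch != c) with hr
  apply le_antisymm
  · apply pvV_le
    · exact le_trans (by positivity) (le_max_left _ _)
    · intro k hk
      by_cases hkc : k = c
      · subst hkc; exact le_max_left _ _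
      · refine le_trans ?_ (le_max_right _ _)
        rw [← count_filter_ne l c k hkc]
        exact mem_count_le_pvV r k (List.mem_filter.2 ⟨hk, by simp [hkc]⟩)
  · apply max_le
    · exact mem_count_le_pvV l c (hl ▸ List.mem_cons_self)
    · apply pvV_le
      · exact zero_le_pvV l
      · intro k hk
        have hmem := List.mem_filter.1 hk
        have hkc : k ≠ c := by simpa using hmem.2
        rw [count_filter_ne l c k hkc]
        exact mem_count_le_pvV l k hmem.1

theorem count_eq_length_sub_filter (c : Char) (l : List Char) :
    ((l.count c : Nat) : Int) = (l.length : Int) - ((l.filter (fun ch => ch != c)).length : Int) := by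
  have h1 : (l.filter (fun ch => ch != c)).length = l.countP (fun ch => ch != c) :=
    List.countP_eq_length_filter.symm
  have h2 : l.count c = l.countP (fun ch => ch == c) := List.count_eq_countP ..
  have h3 : l.countP (fun ch => ch == c) + l.countP (fun ch => ch != c) = l.length := by
    have := List.length_eq_countP_add_countP (l := l) (p := fun ch => ch == c)
    simpa [bne] using this.symm
  omega

theorem altGo_eq_pvV (l : List Char) : pvAltGo l = pvV l := by
  induction l using pvAltGo.induct with
  | case1 => simp [pvAltGo, pvV, pvVals, PySem.List.dedup_eq_ofList, PySem.Set.ofList]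
  | case2 c t rest ih =>
    rw [pvAltGo]
    have hrest : rest = (c :: t).filter (fun ch => ch != c) := by
      simp [rest, PySem.Chars.join_nil_singletons]
    rw [hrest] at ih
    simp only [PySem.Chars.join_nil_singletons]
    rw [ih, pvV_cons c t, ← count_eq_length_sub_filter]

-- ===== A-side proof (from the fused loop to pvV) =====

theorem dedup_append_singleton (l : List Char) (c : Char) :
    PySem.List.dedup (l ++ [c]) =
      if c ∈ l then PySem.List.dedup l else PySem.List.dedup l ++ [c] := by
  rw [PySem.List.dedup_eq_ofList, PySem.Set.ofList_eq_foldl, List.foldl_append, List.foldl_cons,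
    List.foldl_nil, ← PySem.Set.ofList_eq_foldl, PySem.Set.add, ← PySem.List.dedup_eq_ofList]
  simp [PySem.Set.contains]

theorem getD_of_not_contains (d : PySem.Dict Char Int) (c : Char) (h : d.contains c = false) :
    d.getD c 0 = 0 := by
  unfold PySem.Dict.getD
  rw [(PySem.Dict.get?_eq_none_iff_contains d c).2 h]
  rfl

theorem count_append_singleton_ne (l : List Char) (c k : Char) (h : k ≠ c) :
    (l ++ [c]).count k = l.count k := by
  simp [List.count_append, (by simpa using h.symm : ¬ (c = k))]

theorem count_append_singleton_self (l : List Char) (c : Char) :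
    (l ++ [c]).count c = l.count c + 1 := by
  simp [List.count_append]

theorem foldl_max_bump (L1 L2 : List Int) (a v w : Int) (hvw : v ≤ w) :
    (L1 ++ w :: L2).foldl max a = max ((L1 ++ v :: L2).foldl max a) w := by
  simp only [List.foldl_append, List.foldl_cons]
  rw [foldl_max_out L2 _ w, foldl_max_out L2 _ v, max_assoc,
    max_eq_right hvw]

theorem pvV_append (l : List Char) (c : Char) :
    pvV (l ++ [c]) = max (pvV l) ((l.count c : Int) + 1) := by
  unfold pvV pvVals
  rw [dedup_append_singleton]
  by_cases hc : c ∈ l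
  · rw [if_pos hc]
    obtain ⟨s, t, hst⟩ := List.append_of_mem ((PySem.List.mem_dedup _ _).2 hc)
    have hd := PySem.List.nodup_dedup l
    rw [hst] at hd
    have hcs : c ∉ s := by
      have := List.disjoint_of_nodup_append hd
      intro hmem; exact this hmem (List.mem_cons_self)
    have hct : c ∉ t := by
      have := (List.nodup_append.1 hd).2.1
      simpa using (List.nodup_cons.1 this).1
    have hmap : ∀ (u : List Char), c ∉ u →
        u.map (fun k => (((l ++ [c]).count k : Nat) : Int)) = u.map (fun k => ((l.count k : Nat) : Int)) := by
      intro u hu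
      apply List.map_congr_left
      intro k hk
      have hkc : k ≠ c := fun he => hu (he ▸ hk)
      rw [count_append_singleton_ne l c k hkc]
    rw [hst]
    simp only [List.map_append, List.map_cons]
    rw [hmap s hcs, hmap t hct, count_append_singleton_self]
    push_cast
    exact foldl_max_bump _ _ _ _ _ (by omega)
  · rw [if_neg hc]
    have hmap : (PySem.List.dedup l).map (fun k => (((l ++ [c]).count k : Nat) : Int))
        = (PySem.List.dedup l).map (fun k => ((l.count k : Nat) : Int)) := by
      apply List.map_congr_left
      intro k hk
      have hkc : k ≠ c := fun he => hc (he ▸ (PySem.List.mem_dedup _ _).1 hk)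
      rw [count_append_singleton_ne l c k hkc]
    simp only [List.map_append, List.map_cons, List.map_nil, hmap]
    rw [count_append_singleton_self]
    have h0 : l.count c = 0 := List.count_eq_zero.2 hc
    rw [h0]
    simp [List.foldl_append]

theorem step_eq_modify (d : PySem.Dict Char Int) (c : Char) :
    (if d.contains c then d.modify c 0 (· + 1) else d.insert c 1) = d.modify c 0 (· + 1) := by
  unfold PySem.Dict.modify
  split <;> simp_all [getD_of_not_contains]

theorem if_gt_eq_max (a b : Int) : (if b > a then b else a) = max a b := by
  split <;> omega

theorem loopA (l : List Char) : ∀ p : List Char,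
    l.foldl
      (fun (st : PySem.Dict Char Int × Int) c =>
        let frequency := if st.1.contains c then st.1.modify c 0 (· + 1) else st.1.insert c 1
        let fc := frequency.getD c 0
        (frequency, if fc > st.2 then fc else st.2))
      (PySem.Dict.counter p, pvV p)
    = (PySem.Dict.counter (p ++ l), pvV (p ++ l)) := by
  induction l with
  | nil => intro p; simp
  | cons c t ih =>
    intro p
    rw [List.foldl_cons]
    have hfreq : (if (PySem.Dict.counter p).contains c
        then (PySem.Dict.counter p).modify c 0 (· + 1)
        else (PySem.Dict.counter p).insert c 1) = PySem.Dict.counter (p ++ [c]) := by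
      rw [step_eq_modify, PySem.Dict.counter_append_singleton]
    have hfc : (PySem.Dict.counter (p ++ [c])).getD c 0 = (p.count c : Int) + 1 := by
      rw [PySem.Dict.getD_counter]
      rw [count_append_singleton_self]
      push_cast
      ring
    simp only [hfreq, hfc]
    rw [if_gt_eq_max, ← pvV_append, ih (p ++ [c]), ← List.append_cons]

theorem A_eq_pvV (str : String) : mostFrequentlyAppearingLetters str = pvV str.toList := by
  unfold mostFrequentlyAppearingLetters
  have h := loopA str.toList []
  simp only [List.nil_append] at h
  rw [show ((PySem.Dict.empty : PySem.Dict Char Int), (0 : Int))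
      = (PySem.Dict.counter ([] : List Char), pvV []) from rfl, h]

-- ===== VERDICT (by name: the statement is the Claim_ definition above) =====
theorem mostFrequentlyAppearingLetters_spec : Claim_equal_mostFrequentlyAppearingLetters := by
  intro str _
  unfold Spec_mostFrequentlyAppearingLetters mostFrequentlyAppearingLetters_alt
  rw [A_eq_pvV, altGo_eq_pvV]
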